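-- pv_equiv track=rewrite | github.com/dhanraju/python | problem_solving/merge_overlap_intervals.py | merge_overlap_intervals
-- ===== SOURCE A (Python) =====
-- def merge_overlap_intervals(arr):
--     """Merges the overlapping intervals in the given array."""
--     overlap_arr = []
--     overlap_arr = arr[0]
--     for i in range(1, len(arr)):
--         if arr[i][0] < overlap_arr[0] :
--             overlap_arr[0] = arr[i][0]
--         if arr[i][1] > overlap_arr[1]:
--             overlap_arr[1] = arr[i][1]
--     return overlap_arr
-- ===== SOURCE B (Python) =====
-- def merge_overlap_intervals(arr):
--     """Merges the overlapping intervals in the given array."""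
--     by_start = sorted(arr, key=lambda iv: iv[0])
--     by_end = sorted(arr, key=lambda iv: iv[1], reverse=True)
--     first = arr[0]
--     first[0] = by_start[0][0]
--     first[1] = by_end[0][1]
--     return first
-- ===== Notes on version B (the rewrite author's own statement) =====
-- stated objective: alternative
-- what changed: Replaces A's fused running-min/max index loop by a sort-based method: sort by start ascending and take the first start, sort by end descending and take the first end, then write both endpoints into arr[0]; same in-place mutation of arr[0] and same returned (aliased) list.
-- outside the precondition, e.g. on merge_overlap_intervals([[5]]): A returns [5], B raises IndexError; on merge_overlap_intervals([[]]): A returns [], B raises IndexError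
import Mathlib
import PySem

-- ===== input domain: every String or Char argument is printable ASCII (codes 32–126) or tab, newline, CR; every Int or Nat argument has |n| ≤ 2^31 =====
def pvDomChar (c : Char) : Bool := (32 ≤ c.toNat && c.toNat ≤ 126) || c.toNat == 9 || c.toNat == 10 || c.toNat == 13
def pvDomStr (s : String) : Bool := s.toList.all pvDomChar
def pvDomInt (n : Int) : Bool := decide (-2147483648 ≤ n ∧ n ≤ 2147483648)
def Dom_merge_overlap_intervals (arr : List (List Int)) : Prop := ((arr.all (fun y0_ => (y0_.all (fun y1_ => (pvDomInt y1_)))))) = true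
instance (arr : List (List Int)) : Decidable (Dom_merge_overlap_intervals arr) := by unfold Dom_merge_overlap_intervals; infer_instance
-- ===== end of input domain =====

-- B replaces A's fused running-min/max loop by a sort-based method (sort by start, sort by end
-- descending, read the two head keys); Python B performs the same in-place mutation of arr[0] as A;
-- the equivalence proved here is about the return value.


-- ===== PORT A =====
-- loop body of A: the two compare-and-set statements on overlap_arr for one arr[i]
def pvStepA (ov ai : List Int) : List Int :=
  let ov :=
    if PySem.List.pyGetD ai 0 0 < PySem.List.pyGetD ov 0 0 then
      PySem.List.pySetD ov 0 (PySem.List.pyGetD ai 0 0)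
    else ov
  if PySem.List.pyGetD ov 1 0 < PySem.List.pyGetD ai 1 0 then
    PySem.List.pySetD ov 1 (PySem.List.pyGetD ai 1 0)
  else ov

-- overlap_arr = arr[0]; for i in range(1, len(arr)): pvStepA; return overlap_arr
def merge_overlap_intervals (arr : List (List Int)) : List Int :=
  (PySem.List.pyRange 1 arr.length 1).foldl
    (fun ov i => pvStepA ov (PySem.List.pyGetD arr i [])) (arr.headD [])

-- ===== PORT B =====
-- by_start = sorted(arr, key=iv[0]); by_end = sorted(arr, key=iv[1], reverse=True);
-- first = arr[0]; first[0] = by_start[0][0]; first[1] = by_end[0][1]; return first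
def merge_overlap_intervals_alt (arr : List (List Int)) : List Int :=
  let byStart := PySem.List.sorted arr (fun iv => PySem.List.pyGetD iv 0 0) false
  let byEnd := PySem.List.sorted arr (fun iv => PySem.List.pyGetD iv 1 0) true
  let first := arr.headD []
  PySem.List.pySetD
    (PySem.List.pySetD first 0 (PySem.List.pyGetD (PySem.List.pyGetD byStart 0 []) 0 0))
    1 (PySem.List.pyGetD (PySem.List.pyGetD byEnd 0 []) 1 0)

-- ===== PRECONDITION & SPEC =====
-- Pre_ excludes the inputs on which Python raises: the empty list (arr[0] → IndexError) and any
-- array containing an interval with fewer than two endpoints (arr[i][0]/arr[i][1]/iv[1] → IndexError).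
-- This also excludes singleton arrays whose only interval is shorter than two elements, on which A
-- returns it untouched only because its loop never runs, while B's sort keys raise there.
def Pre_merge_overlap_intervals (arr : List (List Int)) : Prop :=
  arr ≠ [] ∧ ∀ iv ∈ arr, 2 ≤ iv.length
instance (arr : List (List Int)) : Decidable (Pre_merge_overlap_intervals arr) := by
  unfold Pre_merge_overlap_intervals; infer_instance

def pvWitness_merge_overlap_intervals : List (List Int) := [[1, 4], [0, 9], [3, 2]]

def Spec_merge_overlap_intervals (arr : List (List Int)) (out : List Int) : Prop := out = merge_overlap_intervals_alt arr
instance (arr : List (List Int)) (out : List Int) : Decidable (Spec_merge_overlap_intervals arr out) := by unfold Spec_merge_overlap_intervals; infer_instance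

-- ===== CLAIM (what is proved, stated in full; the proofs are below) =====
def Claim_equal_merge_overlap_intervals : Prop := ∀ (arr : List (List Int)), Dom_merge_overlap_intervals arr → Pre_merge_overlap_intervals arr → Spec_merge_overlap_intervals arr (merge_overlap_intervals arr)

-- ===== LEMMAS AND PROOFS =====

lemma pvGetD_zero_cons (a : Int) (l : List Int) (d : Int) :
    PySem.List.pyGetD (a :: l) 0 d = a := by
  simp [PySem.List.pyGetD, PySem.List.pyGet?, PySem.List.pyIdx?]

lemma pvGetD_one_cons (a b : Int) (l : List Int) (d : Int) :
    PySem.List.pyGetD (a :: b :: l) 1 d = b := by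
  simp [PySem.List.pyGetD, PySem.List.pyGet?, PySem.List.pyIdx?]

lemma pvGetDL_zero_cons (a : List Int) (l : List (List Int)) (d : List Int) :
    PySem.List.pyGetD (a :: l) 0 d = a := by
  simp [PySem.List.pyGetD, PySem.List.pyGet?, PySem.List.pyIdx?]

lemma pvSetD_zero_cons (a : Int) (l : List Int) (v : Int) :
    PySem.List.pySetD (a :: l) 0 v = v :: l := by
  simp [PySem.List.pySetD, PySem.List.pySet?, PySem.List.pyIdx?]

lemma pvSetD_one_cons (a b : Int) (l : List Int) (v : Int) :
    PySem.List.pySetD (a :: b :: l) 1 v = a :: v :: l := by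
  simp [PySem.List.pySetD, PySem.List.pySet?, PySem.List.pyIdx?]

lemma pvStepA_eq (a b : Int) (t ai : List Int) :
    pvStepA (a :: b :: t) ai =
      min a (PySem.List.pyGetD ai 0 0) :: max b (PySem.List.pyGetD ai 1 0) :: t := by
  simp only [pvStepA]
  split_ifs with h0 h1 h1 <;>
    simp only [pvGetD_zero_cons, pvGetD_one_cons, pvSetD_zero_cons, pvSetD_one_cons] at h0 h1 ⊢ <;>
    simp only [List.cons.injEq] <;>
    exact ⟨by omega, by omega, trivial⟩

lemma pvFoldA_eq (t : List (List Int)) : ∀ (a b : Int) (s : List Int),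
    t.foldl pvStepA (a :: b :: s) =
      t.foldl (fun acc iv => min acc (PySem.List.pyGetD iv 0 0)) a ::
        t.foldl (fun acc iv => max acc (PySem.List.pyGetD iv 1 0)) b :: s := by
  induction t with
  | nil => intro a b s; rfl
  | cons iv t ih =>
    intro a b s
    simp only [List.foldl_cons, pvStepA_eq]
    exact ih _ _ s

-- a member of a :: L that bounds every element of a :: L from below IS the running minimum
lemma pvFoldl_min_eq (L : List Int) (a m : Int) (hm : m ∈ a :: L)
    (hlb : ∀ x ∈ a :: L, m ≤ x) : L.foldl min a = m := by
  have hmem : L.foldl min a ∈ a :: L := by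
    rcases PySem.List.foldl_min_mem L a with h | h
    · rw [h]; exact List.mem_cons_self ..
    · exact List.mem_cons_of_mem _ h
  have hle : L.foldl min a ≤ m := by
    rcases List.mem_cons.1 hm with rfl | h
    · exact (PySem.List.foldl_min_le L m).1
    · exact (PySem.List.foldl_min_le L a).2 m h
  exact le_antisymm hle (hlb _ hmem)

lemma pvFoldl_max_eq (L : List Int) (a m : Int) (hm : m ∈ a :: L)
    (hub : ∀ x ∈ a :: L, x ≤ m) : L.foldl max a = m := by
  have hmem : L.foldl max a ∈ a :: L := by
    rcases PySem.List.foldl_max_mem L a with h | h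
    · rw [h]; exact List.mem_cons_self ..
    · exact List.mem_cons_of_mem _ h
  have hge : m ≤ L.foldl max a := by
    rcases List.mem_cons.1 hm with rfl | h
    · exact (PySem.List.le_foldl_max L m).1
    · exact (PySem.List.le_foldl_max L a).2 m h
  exact le_antisymm (hub _ hmem) hge

-- ===== VERDICT (by name: the statement is the Claim_ definition above) =====
theorem merge_overlap_intervals_spec : Claim_equal_merge_overlap_intervals := by
  intro arr _ hpre
  obtain ⟨hne, hlen⟩ := hpre
  match arr, hne with
  | h :: t, _ =>
    have hh : 2 ≤ h.length := hlen h (by simp)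
    show merge_overlap_intervals (h :: t) = merge_overlap_intervals_alt (h :: t)
    unfold merge_overlap_intervals merge_overlap_intervals_alt
    rw [show ((h :: t).length : Int) = PySem.List.len (h :: t) from (PySem.List.len_eq _).symm,
      PySem.List.foldl_pyRange_pyGetD (h :: t) [] pvStepA ((h :: t).headD []) (by omega)]
    -- name the two sorted lists and their heads
    obtain ⟨m0, r0, hs0⟩ : ∃ m r, PySem.List.sorted (h :: t) (fun iv => PySem.List.pyGetD iv 0 0) false = m :: r := by
      cases hsl : PySem.List.sorted (h :: t) (fun iv => PySem.List.pyGetD iv 0 0) false with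
      | nil => exact absurd ((PySem.List.sorted_eq_nil_iff ..).1 hsl) (by simp)
      | cons m r => exact ⟨m, r, rfl⟩
    obtain ⟨m1, r1, hs1⟩ : ∃ m r, PySem.List.sorted (h :: t) (fun iv => PySem.List.pyGetD iv 1 0) true = m :: r := by
      cases hsl : PySem.List.sorted (h :: t) (fun iv => PySem.List.pyGetD iv 1 0) true with
      | nil => exact absurd ((PySem.List.sorted_eq_nil_iff ..).1 hsl) (by simp)
      | cons m r => exact ⟨m, r, rfl⟩
    have hm0mem : m0 ∈ h :: t := (PySem.List.mem_sorted ..).1 (hs0 ▸ List.mem_cons_self ..)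
    have hm1mem : m1 ∈ h :: t := (PySem.List.mem_sorted ..).1 (hs1 ▸ List.mem_cons_self ..)
    have hlb := PySem.List.key_head_sorted_le (xs := h :: t)
      (key := fun iv => PySem.List.pyGetD iv 0 0) hs0
    have hub := PySem.List.key_head_sorted_rev_ge (xs := h :: t)
      (key := fun iv => PySem.List.pyGetD iv 1 0) hs1
    match h, hh with
    | a :: b :: s, _ =>
      simp only [List.headD_cons, Int.toNat_one, List.drop_succ_cons, List.drop_zero,
        hs0, hs1, pvGetDL_zero_cons]
      rw [pvFoldA_eq]
      -- the two folds over t equal the two sorted-head keys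
      have hmin : t.foldl (fun acc iv => min acc (PySem.List.pyGetD iv 0 0)) a
          = PySem.List.pyGetD m0 0 0 := by
        rw [← List.foldl_map]
        refine pvFoldl_min_eq _ _ _ ?_ ?_
        · have : PySem.List.pyGetD m0 0 0 ∈ ((a :: b :: s) :: t).map (fun iv => PySem.List.pyGetD iv 0 0) :=
            List.mem_map_of_mem hm0mem
          simpa [pvGetD_zero_cons] using this
        · intro x hx
          have : x ∈ ((a :: b :: s) :: t).map (fun iv => PySem.List.pyGetD iv 0 0) := by
            simpa [pvGetD_zero_cons] using hx
          obtain ⟨y, hy, rfl⟩ := List.mem_map.1 this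
          exact hlb y hy
      have hmax : t.foldl (fun acc iv => max acc (PySem.List.pyGetD iv 1 0)) b
          = PySem.List.pyGetD m1 1 0 := by
        rw [← List.foldl_map]
        refine pvFoldl_max_eq _ _ _ ?_ ?_
        · have : PySem.List.pyGetD m1 1 0 ∈ ((a :: b :: s) :: t).map (fun iv => PySem.List.pyGetD iv 1 0) :=
            List.mem_map_of_mem hm1mem
          simpa [pvGetD_one_cons] using this
        · intro x hx
          have : x ∈ ((a :: b :: s) :: t).map (fun iv => PySem.List.pyGetD iv 1 0) := by
            simpa [pvGetD_one_cons] using hx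
          obtain ⟨y, hy, rfl⟩ := List.mem_map.1 this
          exact hub y hy
      rw [hmin, hmax, pvSetD_zero_cons, pvSetD_one_cons]
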